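-- pv_equiv track=rewrite | github.com/LuisAlexisSalazar/back_visualizadorMolecular | alignmentAlgorithms/PrediccionEstructuraSecuencial/Nussinov.py | bool_list
-- ===== SOURCE A (Python) =====
-- def bool_list(way):
--     index = way[0]
--     list_bool = []
--     way = way[1::]
--
--     for i, next_node in enumerate(way):
--         index_diagonal = (index[0] - 1, index[1] - 1)
--         if index_diagonal == next_node:
--             list_bool.append(1)
--         else:
--             list_bool.append(0)
--         index = next_node
--     return list_bool
-- ===== SOURCE B (Python) =====
-- def bool_list(way):
--     prev = way[0]
--     rest = way[1:]
--     if not rest: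
--         return []
--     nxt = rest[0]
--     step = 1 if (prev[0] - nxt[0], prev[1] - nxt[1]) == (1, 1) else 0
--     return [step] + bool_list(rest)
-- ===== Notes on version B (the rewrite author's own statement) =====
-- stated objective: alternative
-- what changed: Replaces A's iterative append loop with a running index by head-cons self-recursion on the suffix, and decides each step by the coordinate difference being (1,1) instead of comparing against a computed diagonal tuple.
import Mathlib
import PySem

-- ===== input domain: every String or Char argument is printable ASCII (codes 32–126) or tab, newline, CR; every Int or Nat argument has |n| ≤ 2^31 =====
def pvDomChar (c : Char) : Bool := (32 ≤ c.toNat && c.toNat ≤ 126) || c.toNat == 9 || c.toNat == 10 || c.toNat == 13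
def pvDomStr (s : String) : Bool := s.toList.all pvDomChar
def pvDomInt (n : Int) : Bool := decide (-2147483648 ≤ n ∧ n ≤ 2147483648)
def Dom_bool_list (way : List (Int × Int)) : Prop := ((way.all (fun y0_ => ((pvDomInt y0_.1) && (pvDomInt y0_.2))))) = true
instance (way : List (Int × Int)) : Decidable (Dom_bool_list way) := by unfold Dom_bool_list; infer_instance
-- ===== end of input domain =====

-- B replaces A's iterative running-index append loop by head-cons self-recursion deciding each step via the coordinate difference (alternative); Pre_ excludes [], where A raises IndexError.


-- ===== PORT A =====
def bool_list (way : List (Int × Int)) : List Int :=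
  match PySem.List.pyGet? way 0 with
  | none => []  -- way[0] raises IndexError; excluded by Pre_bool_list
  | some index0 =>
    let way1 := PySem.List.slice way (some 1) none
    (way1.foldl (fun (st : (Int × Int) × List Int) next_node =>
        let index_diagonal := (st.1.1 - 1, st.1.2 - 1)
        if index_diagonal = next_node then (next_node, st.2 ++ [1])
        else (next_node, st.2 ++ [0]))
      (index0, ([] : List Int))).2

-- ===== PORT B =====
-- B: way[0] raises on empty (excluded by Pre_); with fewer than two nodes the
-- result is []; otherwise cons the mark for the first step onto the recursive
-- call on the suffix.
def bool_list_alt : List (Int × Int) → List Int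
  | [] => []        -- way[0] raises IndexError in Python; excluded by Pre_bool_list
  | [_] => []
  | prev :: nxt :: rest =>
      (if (prev.1 - nxt.1, prev.2 - nxt.2) = ((1 : Int), (1 : Int)) then (1 : Int) else 0)
        :: bool_list_alt (nxt :: rest)

-- ===== PRECONDITION & SPEC =====
-- Pre_ excludes only the empty list, on which A raises IndexError at way[0].
def Pre_bool_list (way : List (Int × Int)) : Prop := way ≠ []
instance (way : List (Int × Int)) : Decidable (Pre_bool_list way) := by unfold Pre_bool_list; infer_instance
def pvWitness_bool_list : (List (Int × Int)) := [(2, 3), (1, 2), (0, 2)]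

def Spec_bool_list (way : List (Int × Int)) (out : List Int) : Prop := out = bool_list_alt way
instance (way : List (Int × Int)) (out : List Int) : Decidable (Spec_bool_list way out) := by unfold Spec_bool_list; infer_instance

-- ===== CLAIM (what is proved, stated in full; the proofs are below) =====
def Claim_equal_bool_list : Prop := ∀ (way : List (Int × Int)), Dom_bool_list way → Pre_bool_list way → Spec_bool_list way (bool_list way)

-- ===== LEMMAS AND PROOFS =====
-- A's loop, started at index idx with accumulator acc, produces acc ++ B's recursion on idx :: rest.
theorem bool_list_loop_eq (rest : List (Int × Int)) (idx : Int × Int) (acc : List Int) :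
    (rest.foldl (fun (st : (Int × Int) × List Int) next_node =>
        let index_diagonal := (st.1.1 - 1, st.1.2 - 1)
        if index_diagonal = next_node then (next_node, st.2 ++ [1])
        else (next_node, st.2 ++ [0]))
      (idx, acc)).2
    = acc ++ bool_list_alt (idx :: rest) := by
  induction rest generalizing idx acc with
  | nil => simp [bool_list_alt]
  | cons h t ih =>
    simp only [List.foldl_cons, bool_list_alt]
    by_cases hc : (idx.1 - 1, idx.2 - 1) = h
    · have hd : (idx.1 - h.1, idx.2 - h.2) = ((1 : Int), (1 : Int)) := by
        obtain ⟨h1, h2⟩ := Prod.mk.injEq .. ▸ hc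
        simp [Prod.ext_iff]; omega
      simp [hc, hd, ih, List.append_assoc]
    · have hd : ¬ (idx.1 - h.1, idx.2 - h.2) = ((1 : Int), (1 : Int)) := by
        simp only [Prod.ext_iff] at hc ⊢
        intro h'; exact hc ⟨by omega, by omega⟩
      simp [hc, hd, ih, List.append_assoc]

-- ===== VERDICT (by name: the statement is the Claim_ definition above) =====
theorem bool_list_spec : Claim_equal_bool_list := by
  intro way _ hpre
  cases way with
  | nil => exact absurd rfl hpre
  | cons h t =>
    show bool_list (h :: t) = bool_list_alt (h :: t)
    simp only [bool_list, PySem.List.pyGet?, PySem.List.pyIdx?, PySem.List.slice_from_one]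
    simp [bool_list_loop_eq, List.tail]
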